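-- pv_equiv track=rewrite | github.com/NightCloud-Team/Luminous | function/functions.py | remove_duplicates_but_keep_specific
-- ===== SOURCE A (Python) =====
-- def remove_duplicates_but_keep_specific(lst, keep_list):
--     result = []
--     seen = set()
--
--     for item in lst:
--         # 如果该元素在需要保留的列表中，直接添加
--         if item in keep_list:
--             result.append(item)
--         # 如果该元素不在需要保留的列表中，并且它还没被添加到结果中
--         elif item not in seen:
--             result.append(item)
--             seen.add(item)
--
--     return result
-- ===== SOURCE B (Python) =====
-- def remove_duplicates_but_keep_specific(lst, keep_list):
--     result = []
--     for item in reversed(lst):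
--         if item not in keep_list:
--             result = [y for y in result if y != item]
--         result.append(item)
--     result.reverse()
--     return result
-- ===== Notes on version B (the rewrite author's own statement) =====
-- stated objective: alternative
-- what changed: B processes the list right-to-left, deleting from the already-collected result every later duplicate of a non-kept item before appending it, then reverses; A's forward pass with a seen-set disappears.
import Mathlib
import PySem

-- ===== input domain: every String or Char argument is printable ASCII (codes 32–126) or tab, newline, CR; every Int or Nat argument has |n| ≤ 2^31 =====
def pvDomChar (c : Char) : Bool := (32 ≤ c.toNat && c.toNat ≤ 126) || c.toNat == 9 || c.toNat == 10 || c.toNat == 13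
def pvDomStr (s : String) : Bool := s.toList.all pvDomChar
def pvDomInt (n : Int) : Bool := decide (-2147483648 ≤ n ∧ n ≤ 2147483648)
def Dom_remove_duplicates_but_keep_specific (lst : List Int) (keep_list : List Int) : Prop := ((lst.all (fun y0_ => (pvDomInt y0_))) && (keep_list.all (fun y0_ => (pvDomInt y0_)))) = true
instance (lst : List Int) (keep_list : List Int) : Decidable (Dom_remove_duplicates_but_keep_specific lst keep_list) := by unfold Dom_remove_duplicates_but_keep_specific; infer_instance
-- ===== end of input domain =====

-- B replaces A's forward seen-set pass by a right-to-left pass that deletes later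
-- duplicates of each non-kept item from the collected result ("alternative").

-- ===== PORT A =====
-- result/seen loop, step for step; state is (result, seen)
def remove_duplicates_but_keep_specific (lst : List Int) (keep_list : List Int) : List Int :=
  (lst.foldl (fun (st : List Int × PySem.Set Int) item =>
      if item ∈ keep_list then (st.1 ++ [item], st.2)
      else if item ∉ st.2 then (st.1 ++ [item], PySem.Set.add st.2 item)
      else st)
    ([], PySem.Set.empty)).1

-- ===== PORT B =====
-- for item in reversed(lst): if item not in keep_list: result = [y for y in result if y != item]; result.append(item)
-- then result.reverse()
def remove_duplicates_but_keep_specific_alt (lst : List Int) (keep_list : List Int) : List Int :=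
  (lst.reverse.foldl (fun result item =>
      (if item ∉ keep_list then result.filter (fun y => y != item) else result) ++ [item])
    []).reverse

-- ===== PRECONDITION & SPEC =====
def Spec_remove_duplicates_but_keep_specific (lst : List Int) (keep_list : List Int) (out : List Int) : Prop := out = remove_duplicates_but_keep_specific_alt lst keep_list
instance (lst : List Int) (keep_list : List Int) (out : List Int) : Decidable (Spec_remove_duplicates_but_keep_specific lst keep_list out) := by unfold Spec_remove_duplicates_but_keep_specific; infer_instance

-- ===== CLAIM (what is proved, stated in full; the proofs are below) =====
def Claim_equal_remove_duplicates_but_keep_specific : Prop := ∀ (lst : List Int) (keep_list : List Int), Dom_remove_duplicates_but_keep_specific lst keep_list → Spec_remove_duplicates_but_keep_specific lst keep_list (remove_duplicates_but_keep_specific lst keep_list)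

-- ===== LEMMAS AND PROOFS =====

-- reference recursion: keep head, and drop later duplicates of a non-kept head from the tail's result
def pvDedup (keep_list : List Int) : List Int → List Int
  | [] => []
  | x :: xs => if x ∈ keep_list then x :: pvDedup keep_list xs
               else x :: (pvDedup keep_list xs).filter (fun y => y != x)

-- A's loop logic with an explicit seen list, result accumulator stripped
def pvH (keep_list S : List Int) : List Int → List Int
  | [] => []
  | x :: xs => if x ∈ keep_list then x :: pvH keep_list S xs
               else if x ∈ S then pvH keep_list S xs
               else x :: pvH keep_list (S ++ [x]) xs

lemma pvH_eq_filter (keep_list : List Int) :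
    ∀ (xs S : List Int),
      pvH keep_list S xs
        = (pvDedup keep_list xs).filter (fun y => decide (y ∈ keep_list) || !decide (y ∈ S)) := by
  intro xs
  induction xs with
  | nil => intro S; simp [pvH, pvDedup]
  | cons x xs ih =>
    intro S
    by_cases hk : x ∈ keep_list
    · simp [pvH, pvDedup, hk, ih S]
    · by_cases hS : x ∈ S
      · have h1 : pvH keep_list S (x :: xs) = pvH keep_list S xs := by simp [pvH, hk, hS]
        rw [h1, ih S]
        have h2 : pvDedup keep_list (x :: xs)
            = x :: (pvDedup keep_list xs).filter (fun y => y != x) := by simp [pvDedup, hk]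
        rw [h2]
        have hx : (decide (x ∈ keep_list) || !decide (x ∈ S)) = false := by simp [hk, hS]
        simp only [List.filter_cons, hx, List.filter_filter]
        apply List.filter_congr
        intro y _
        by_cases hyx : y = x
        · subst hyx; simp [hk, hS]
        · simp [hyx]
      · have h1 : pvH keep_list S (x :: xs) = x :: pvH keep_list (S ++ [x]) xs := by
          simp [pvH, hk, hS]
        rw [h1, ih (S ++ [x])]
        have h2 : pvDedup keep_list (x :: xs)
            = x :: (pvDedup keep_list xs).filter (fun y => y != x) := by simp [pvDedup, hk]
        rw [h2]
        have hx : (decide (x ∈ keep_list) || !decide (x ∈ S)) = true := by simp [hS]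
        simp only [List.filter_cons, hx, List.filter_filter]
        congr 1
        apply List.filter_congr
        intro y _
        by_cases hyx : y = x
        · subst hyx; simp [hk]
        · simp [hyx]

lemma A_fold (keep_list : List Int) :
    ∀ (xs res : List Int) (seen : PySem.Set Int),
      (xs.foldl (fun (st : List Int × PySem.Set Int) item =>
          if item ∈ keep_list then (st.1 ++ [item], st.2)
          else if item ∉ st.2 then (st.1 ++ [item], PySem.Set.add st.2 item)
          else st) (res, seen)).1
        = res ++ pvH keep_list seen xs := by
  intro xs
  induction xs with
  | nil => intro res seen; simp [pvH]
  | cons x xs ih =>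
    intro res seen
    by_cases hk : x ∈ keep_list
    · simp only [List.foldl_cons, if_pos hk]
      rw [ih (res ++ [x]) seen]
      simp [pvH, hk]
    · by_cases hS : x ∈ seen
      · simp only [List.foldl_cons, if_neg hk, if_neg (not_not_intro hS)]
        rw [ih res seen]
        simp [pvH, hk, hS]
      · simp only [List.foldl_cons, if_neg hk, if_pos hS]
        rw [ih (res ++ [x]) (PySem.Set.add seen x)]
        have hadd : PySem.Set.add seen x = seen ++ [x] := by simp [PySem.Set.add, hS]
        rw [hadd]; simp [pvH, hk, hS]

lemma B_fold (keep_list : List Int) :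
    ∀ (xs : List Int),
      xs.reverse.foldl (fun result item =>
          (if item ∉ keep_list then result.filter (fun y => y != item) else result) ++ [item]) []
        = (pvDedup keep_list xs).reverse := by
  intro xs
  induction xs with
  | nil => simp [pvDedup]
  | cons x xs ih =>
    simp only [List.reverse_cons, List.foldl_append, List.foldl_cons, List.foldl_nil, ih]
    by_cases hk : x ∈ keep_list
    · simp [pvDedup, hk]
    · simp [pvDedup, hk, List.filter_reverse]

-- ===== VERDICT (by name: the statement is the Claim_ definition above) =====
theorem remove_duplicates_but_keep_specific_spec : Claim_equal_remove_duplicates_but_keep_specific := by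
  intro lst keep_list _
  unfold Spec_remove_duplicates_but_keep_specific
  unfold remove_duplicates_but_keep_specific remove_duplicates_but_keep_specific_alt
  rw [A_fold keep_list lst [] PySem.Set.empty, B_fold keep_list lst, List.reverse_reverse,
    List.nil_append]
  rw [show (PySem.Set.empty : PySem.Set Int) = ([] : List Int) from rfl, pvH_eq_filter]
  simp
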